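-- pv_equiv track=rewrite | github.com/theCivilCoder/Dynamics_Solver | Calc Vars9a - Test Var.py | ReplaceSingleVar
-- ===== SOURCE A (Python) =====
-- def ReplaceSingleVar(str1, var_i, Replacement):
-- 	new_str =''
-- 	for idx, character in enumerate(str1):
-- 		if idx < len(str1)-1:
-- 			if (character == var_i) & ((str1[idx+1].isalpha()) or (str1[idx+1]==',')):
-- 				new_str+=character
-- 			elif character == var_i:
-- 				new_str+=Replacement
-- 			else:
-- 				new_str+=character
-- 		else:
-- 			if (character == var_i):
-- 				new_str+=Replacement
-- 			else:
-- 				new_str+=character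
-- 	return new_str
-- ===== SOURCE B (Python) =====
-- def ReplaceSingleVar(str1, var_i, Replacement):
--     # Only a single-character variable can ever match a character of str1.
--     if len(var_i) != 1:
--         return str1
--     parts = str1.split(var_i)
--     suffix = parts[-1]     # the original text after the occurrence being processed
--     out = parts[-1]        # the rewritten text after it
--     for p in reversed(parts[:-1]):
--         nxt = suffix[:1]
--         keep = bool(nxt) and (nxt.isalpha() or nxt == ',')
--         out = p + (var_i if keep else Replacement) + out
--         suffix = p + var_i + suffix
--     return out
-- ===== Notes on version B (the rewrite author's own statement) =====
-- stated objective: faster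
-- what changed: B splits str1 on var_i (guarding that var_i is a single character) and rejoins the parts right to left, choosing var_i or Replacement at each split point from the first character of the original suffix, instead of A's indexed per-character loop that appends one character at a time.
import Mathlib
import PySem

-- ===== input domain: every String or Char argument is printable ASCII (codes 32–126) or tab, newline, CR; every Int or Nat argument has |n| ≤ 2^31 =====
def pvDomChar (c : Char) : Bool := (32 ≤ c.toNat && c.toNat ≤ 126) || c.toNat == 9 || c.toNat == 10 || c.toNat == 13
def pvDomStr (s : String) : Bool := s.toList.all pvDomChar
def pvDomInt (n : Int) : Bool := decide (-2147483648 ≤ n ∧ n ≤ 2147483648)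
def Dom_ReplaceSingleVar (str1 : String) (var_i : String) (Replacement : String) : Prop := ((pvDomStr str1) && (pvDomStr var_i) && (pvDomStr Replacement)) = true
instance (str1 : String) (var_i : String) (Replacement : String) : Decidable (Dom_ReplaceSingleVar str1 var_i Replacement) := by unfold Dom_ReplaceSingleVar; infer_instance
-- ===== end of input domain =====

-- B rewrites via split-on-the-variable and a right-to-left rejoin of whole parts instead of
-- A's indexed per-character loop; same O(n) algorithmic class, measurably faster by constant factor.

-- ===== PORT A =====
-- the body of A's for-loop (new_str is the accumulator, p = (idx, character), s = str1)
def pvBodyA (s v R : List Char) (new_str : List Char) (p : Int × Char) : List Char :=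
  if p.1 < PySem.List.len s - 1 then
    if [p.2] = v ∧ (PySem.Chars.isalpha (PySem.List.pyGetD s (p.1 + 1) ' ') = true ∨ PySem.List.pyGetD s (p.1 + 1) ' ' = ',') then
      new_str ++ [p.2]
    else if [p.2] = v then
      new_str ++ R
    else
      new_str ++ [p.2]
  else
    if [p.2] = v then new_str ++ R else new_str ++ [p.2]

def ReplaceSingleVar (str1 : String) (var_i : String) (Replacement : String) : String :=
  String.ofList ((PySem.List.enumerate str1.toList 0).foldl
    (pvBodyA str1.toList var_i.toList Replacement.toList) [])

-- ===== PORT B =====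
-- the body of B's for-loop: st = (suffix, out), p the next part to the left
def pvBStep (vc : Char) (R : List Char) (st : List Char × List Char) (p : List Char) : List Char × List Char :=
  let nxt := PySem.Chars.slice st.1 none (some 1)
  let keep := nxt ≠ [] ∧ (PySem.Chars.strIsalpha nxt = true ∨ nxt = [','])
  (p ++ vc :: st.1, p ++ (if keep then [vc] else R) ++ st.2)

def ReplaceSingleVar_alt (str1 : String) (var_i : String) (Replacement : String) : String :=
  match var_i.toList with
  | [vc] =>
    let parts := str1.toList.splitOn vc
    let last := PySem.List.pyGetD parts (-1) []
    let res := (PySem.List.slice parts none (some (-1))).reverse.foldl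
      (pvBStep vc Replacement.toList) (last, last)
    String.ofList res.2
  | _ => str1

-- ===== PRECONDITION & SPEC =====
def Spec_ReplaceSingleVar (str1 : String) (var_i : String) (Replacement : String) (out : String) : Prop := out = ReplaceSingleVar_alt str1 var_i Replacement
instance (str1 : String) (var_i : String) (Replacement : String) (out : String) : Decidable (Spec_ReplaceSingleVar str1 var_i Replacement out) := by unfold Spec_ReplaceSingleVar; infer_instance

-- ===== CLAIM (what is proved, stated in full; the proofs are below) =====
def Claim_equal_ReplaceSingleVar : Prop := ∀ (str1 : String) (var_i : String) (Replacement : String), Dom_ReplaceSingleVar str1 var_i Replacement → Spec_ReplaceSingleVar str1 var_i Replacement (ReplaceSingleVar str1 var_i Replacement)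

-- ===== LEMMAS AND PROOFS =====

-- the chunk A emits for one character (lookahead rest)
def pvHead (v R : List Char) (c : Char) (rest : List Char) : List Char :=
  if [c] = v then
    (match rest with
     | n :: _ => if PySem.Chars.isalpha n = true ∨ n = ',' then [c] else R
     | [] => R)
  else [c]

-- A's result, written as a lookahead recursion over the remaining characters
def pvARec (v R : List Char) : List Char → List Char
  | [] => []
  | c :: rest => pvHead v R c rest ++ pvARec v R rest

-- A's fold equals the lookahead recursion
theorem pvA_loop (v R : List Char) (l : List Char) : ∀ (pre acc : List Char),
    (PySem.List.enumerate l (pre.length : Int)).foldl (pvBodyA (pre ++ l) v R) acc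
      = acc ++ pvARec v R l := by
  induction l with
  | nil => intro pre acc; simp [PySem.List.enumerate_nil, pvARec]
  | cons c rest ih =>
    intro pre acc
    rw [PySem.List.enumerate_cons, List.foldl_cons]
    have hbody : pvBodyA (pre ++ c :: rest) v R acc ((pre.length : Int), c)
        = acc ++ pvHead v R c rest := by
      unfold pvBodyA pvHead
      cases rest with
      | nil =>
        have : ¬ ((pre.length : Int) < PySem.List.len (pre ++ [c]) - 1) := by
          simp [PySem.List.len_eq]
        simp only [this, if_false]
        split <;> rfl
      | cons n t =>
        have hc : (pre.length : Int) < PySem.List.len (pre ++ c :: n :: t) - 1 := by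
          simp [PySem.List.len_eq]; omega
        have hg : PySem.List.pyGetD (pre ++ c :: n :: t) ((pre.length : Int) + 1) ' ' = n := by
          have : ((pre.length : Int) + 1) = ((pre.length + 1 : Nat) : Int) := by push_cast; ring
          rw [this, PySem.List.pyGetD_natCast]
          rw [List.getD_eq_getElem?_getD, List.getElem?_append_right (by omega)]
          simp
        simp only [hc, if_true, hg]
        by_cases hv : [c] = v
        · by_cases ha : PySem.Chars.isalpha n = true ∨ n = ','
          · simp [hv, ha]
          · simp [hv, ha]
        · simp [hv]
    rw [hbody]
    have hpre : (pre.length : Int) + 1 = ((pre ++ [c]).length : Int) := by simp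
    have happ : pre ++ c :: rest = (pre ++ [c]) ++ rest := by simp
    rw [hpre, happ, ih (pre ++ [c])]
    simp [pvARec]

-- characters different from the variable are copied unchanged
theorem pvARec_copy (vc : Char) (R : List Char) (p : List Char) (hp : vc ∉ p) (z : List Char) :
    pvARec [vc] R (p ++ z) = p ++ pvARec [vc] R z := by
  induction p with
  | nil => simp
  | cons c p' ih =>
    simp only [List.mem_cons, not_or] at hp
    have hc : ¬ ([c] = [vc]) := by
      intro h
      exact hp.1 (by simpa using h.symm)
    simp only [List.cons_append, pvARec, pvHead, hc, if_false, ih hp.2]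
    simp

-- a variable occurrence, decided by the head of the original suffix
theorem pvARec_head (vc : Char) (R su : List Char) :
    pvARec [vc] R (vc :: su)
      = (if (PySem.Chars.slice su none (some 1)) ≠ [] ∧
            (PySem.Chars.strIsalpha (PySem.Chars.slice su none (some 1)) = true ∨
             PySem.Chars.slice su none (some 1) = [','])
         then [vc] else R) ++ pvARec [vc] R su := by
  have hsl : PySem.Chars.slice su none (some 1) = su.take 1 := by
    simpa using PySem.List.slice_to su (b := 1) (by norm_num)
  rw [hsl]
  cases su with
  | nil => simp [pvARec, pvHead]
  | cons n t =>
    have h1 : List.take 1 (n :: t) = [n] := rfl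
    have h2 : PySem.Chars.strIsalpha [n] = PySem.Chars.isalpha n := by
      simp [PySem.Chars.strIsalpha]
    by_cases h : PySem.Chars.isalpha n = true ∨ n = ','
    · rcases h with h | h <;> simp [pvARec, pvHead, h1, h2, h]
    · push_neg at h
      simp [pvARec, pvHead, h1, h2, h.1, h.2]

-- splitOnP produces a nonempty list of parts
theorem pvSplitOnP_ne_nil {α : Type} (p : α → Bool) (l : List α) : List.splitOnP p l ≠ [] := by
  induction l with
  | nil => simp [List.splitOnP_nil]
  | cons x xs ih =>
    rw [List.splitOnP_cons]
    split
    · simp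
    · cases h : List.splitOnP p xs with
      | nil => exact absurd h ih
      | cons a t => simp [List.modifyHead]

-- the predicate holds on no character of any part
theorem pvSplitOnP_free {α : Type} (p : α → Bool) (l : List α) :
    ∀ part ∈ List.splitOnP p l, ∀ c ∈ part, p c = false := by
  induction l with
  | nil => simp [List.splitOnP_nil]
  | cons x xs ih =>
    rw [List.splitOnP_cons]
    split
    · rintro part hp c hc
      rcases List.mem_cons.mp hp with rfl | hp
      · cases hc
      · exact ih part hp c hc
    · rename_i hx
      cases h : List.splitOnP p xs with
      | nil => exact absurd h (pvSplitOnP_ne_nil p xs)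
      | cons a t =>
        simp only [List.modifyHead]
        rintro part hp c hc
        rcases List.mem_cons.mp hp with rfl | hp
        · rcases List.mem_cons.mp hc with rfl | hc
          · simpa using hx
          · exact ih a (h ▸ List.mem_cons_self) c hc
        · exact ih part (h ▸ List.mem_cons_of_mem a hp) c hc

-- a variable of length ≠ 1 never matches a character: A copies the string
theorem pvARec_of_ne_one (v R : List Char) (hv : v.length ≠ 1) (l : List Char) : pvARec v R l = l := by
  induction l with
  | nil => rfl
  | cons c rest ih =>
    have hc : ¬ ([c] = v) := fun h => hv (h ▸ rfl)
    simp [pvARec, pvHead, hc, ih]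

-- B's right-to-left fold rebuilds the original suffix and A's rewriting of it
theorem pvB_fold (vc : Char) (R : List Char) :
    ∀ (parts : List (List Char)) (h : parts ≠ []),
      (∀ p ∈ parts, vc ∉ p) →
      parts.dropLast.reverse.foldl (pvBStep vc R) (parts.getLast h, parts.getLast h)
        = ([vc].intercalate parts, pvARec [vc] R ([vc].intercalate parts)) := by
  intro parts
  induction parts with
  | nil => intro h; exact absurd rfl h
  | cons q rest ih =>
    intro h hfree
    cases rest with
    | nil =>
      have hq : vc ∉ q := hfree q (by simp)
      have h2 : pvARec [vc] R q = q := by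
        have := pvARec_copy vc R q hq []
        simpa [pvARec] using this
      simp [List.intercalate, h2]
    | cons p2 t =>
      have hq : vc ∉ q := hfree q (by simp)
      have hne : p2 :: t ≠ [] := by simp
      have hdrop : (q :: p2 :: t).dropLast = q :: (p2 :: t).dropLast :=
        List.dropLast_cons_of_ne_nil hne
      have hlast : (q :: p2 :: t).getLast h = (p2 :: t).getLast hne := List.getLast_cons hne
      rw [hdrop, List.reverse_cons, List.foldl_append, hlast,
        ih hne (fun p hp => hfree p (List.mem_cons_of_mem q hp))]
      rw [List.foldl_cons, List.foldl_nil]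
      have hJ : [vc].intercalate (q :: p2 :: t) = q ++ [vc] ++ [vc].intercalate (p2 :: t) := by
        simp [List.intercalate]
      rw [hJ]
      have hcopy := pvARec_copy vc R q hq (vc :: [vc].intercalate (p2 :: t))
      have hhead := pvARec_head vc R ([vc].intercalate (p2 :: t))
      simp [pvBStep, hcopy, hhead]

-- A in closed recursive form
theorem pvA_eq (str1 var_i Replacement : String) :
    ReplaceSingleVar str1 var_i Replacement
      = String.ofList (pvARec var_i.toList Replacement.toList str1.toList) := by
  unfold ReplaceSingleVar
  have := pvA_loop var_i.toList Replacement.toList str1.toList [] []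
  simp only [List.length_nil, Nat.cast_zero, List.nil_append] at this
  rw [this]

-- ===== VERDICT (by name: the statement is the Claim_ definition above) =====
theorem ReplaceSingleVar_spec : Claim_equal_ReplaceSingleVar := by
  unfold Claim_equal_ReplaceSingleVar Spec_ReplaceSingleVar
  intro str1 var_i Replacement _
  rw [pvA_eq]
  unfold ReplaceSingleVar_alt
  cases hv : var_i.toList with
  | nil =>
    rw [pvARec_of_ne_one _ _ (by simp) _]
    exact String.ofList_toList
  | cons vc rest =>
    cases rest with
    | cons c2 t2 =>
      rw [pvARec_of_ne_one _ _ (by simp) _]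
      exact String.ofList_toList
    | nil =>
      have hsplit : str1.toList.splitOn vc = List.splitOnP (· == vc) str1.toList := rfl
      have hne : str1.toList.splitOn vc ≠ [] := by
        rw [hsplit]; exact pvSplitOnP_ne_nil _ _
      have hfree : ∀ p ∈ str1.toList.splitOn vc, vc ∉ p := by
        intro p hp hmem
        have := pvSplitOnP_free (· == vc) str1.toList p (hsplit ▸ hp) vc hmem
        simp at this
      have hget : PySem.List.pyGetD (str1.toList.splitOn vc) (-1) []
          = (str1.toList.splitOn vc).getLast hne := PySem.List.pyGetD_neg_one _ [] hne
      have hslice : PySem.List.slice (str1.toList.splitOn vc) none (some (-1))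
          = (str1.toList.splitOn vc).dropLast := PySem.List.slice_to_neg_one _
      simp only [hget, hslice]
      rw [pvB_fold vc Replacement.toList (str1.toList.splitOn vc) hne hfree]
      rw [List.intercalate_splitOn]
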